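-- pv_equiv track=rewrite | github.com/cx-z/Simulation | max_profit/Graph.py | checkCircle
-- ===== SOURCE A (Python) =====
-- def checkCircle(path:tuple):
--     nodes = set()
--     for i in path:
--         if i in nodes:
--             return True
--         else:
--             nodes.add(i)
--     return False
-- ===== SOURCE B (Python) =====
-- def checkCircle(path: tuple):
--     s = sorted(path)
--     return any(x == y for x, y in zip(s, s[1:]))
-- ===== Notes on version B (the rewrite author's own statement) =====
-- stated objective: alternative
-- what changed: Replaced the hash-set accumulate-and-check loop by a comparison-based algorithm: sort the path, then scan adjacent pairs for an equal neighbour; no set is built and no early return per element.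
import Mathlib
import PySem

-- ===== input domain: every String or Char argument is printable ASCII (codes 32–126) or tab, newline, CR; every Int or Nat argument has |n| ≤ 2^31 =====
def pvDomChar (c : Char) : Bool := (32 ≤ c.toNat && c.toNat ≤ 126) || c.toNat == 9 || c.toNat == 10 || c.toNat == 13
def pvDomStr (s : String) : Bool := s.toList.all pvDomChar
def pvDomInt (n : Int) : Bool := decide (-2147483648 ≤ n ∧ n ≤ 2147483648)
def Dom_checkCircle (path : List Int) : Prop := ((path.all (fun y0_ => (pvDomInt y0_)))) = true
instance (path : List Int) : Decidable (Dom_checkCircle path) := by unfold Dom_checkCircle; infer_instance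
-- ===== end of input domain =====

-- B replaces A's hash-set accumulate-and-check loop with a different algorithm:
-- sort the path, then scan adjacent pairs for an equal neighbour (no speed claim).

-- ===== PORT A =====
-- the for-loop with early return, carrying the accumulated set 'nodes'
def checkCircleLoop (rest : List Int) (nodes : PySem.Set Int) : Bool :=
  match rest with
  | [] => false
  | i :: rest' =>
    if PySem.Set.contains nodes i then true
    else checkCircleLoop rest' (PySem.Set.add nodes i)

def checkCircle (path : List Int) : Bool :=
  checkCircleLoop path PySem.Set.empty

-- ===== PORT B =====
-- s = sorted(path); any(x == y for x, y in zip(s, s[1:]))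
def checkCircle_alt (path : List Int) : Bool :=
  let s := PySem.List.sorted path (fun x => x) false
  (s.zip (PySem.List.slice s (some 1) none)).any (fun p => p.1 == p.2)

-- ===== PRECONDITION & SPEC =====
def Spec_checkCircle (path : List Int) (out : Bool) : Prop := out = checkCircle_alt path
instance (path : List Int) (out : Bool) : Decidable (Spec_checkCircle path out) := by unfold Spec_checkCircle; infer_instance

-- ===== CLAIM (what is proved, stated in full; the proofs are below) =====
def Claim_equal_checkCircle : Prop := ∀ (path : List Int), Dom_checkCircle path → Spec_checkCircle path (checkCircle path)

-- ===== LEMMAS AND PROOFS =====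

-- A's loop detects exactly a violation of Nodup of accumulator-plus-remainder.
lemma checkCircleLoop_eq (path : List Int) : ∀ (nodes : PySem.Set Int), nodes.Nodup →
    checkCircleLoop path nodes = decide (¬ (nodes ++ path).Nodup) := by
  induction path with
  | nil => intro nodes h; simp [checkCircleLoop, h]
  | cons i rest ih =>
    intro nodes h
    by_cases hi : i ∈ nodes
    · rw [checkCircleLoop, if_pos ((PySem.Set.contains_iff nodes i).2 hi)]
      have hnot : ¬ (nodes ++ i :: rest).Nodup := by
        simp only [List.nodup_append]
        rintro ⟨-, -, hdis⟩
        exact hdis i hi i (by simp) rfl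
      simp [hnot]
    · have hc : PySem.Set.contains nodes i = false := by
        rw [Bool.eq_false_iff]
        intro hcc
        exact hi ((PySem.Set.contains_iff nodes i).1 hcc)
      rw [checkCircleLoop, hc, if_neg (by simp), PySem.Set.add_of_not_mem hi,
        ih (nodes ++ [i]) (by simp [List.nodup_append, h]; exact fun a ha he => hi (he ▸ ha))]
      have : (nodes ++ [i]) ++ rest = nodes ++ i :: rest := by simp
      rw [this]

-- on a ≤-sorted list, an equal adjacent pair exists iff the list has a duplicate
lemma adjEq_eq_not_nodup : ∀ (s : List Int), s.Pairwise (· ≤ ·) →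
    ((s.zip s.tail).any (fun p => p.1 == p.2)) = decide (¬ s.Nodup) := by
  intro s
  induction s with
  | nil => intro _; simp
  | cons a t ih =>
    intro h
    match t, h with
    | [], _ => simp
    | b :: t', h =>
      have hab : a ≤ b := (List.pairwise_cons.1 h).1 b (by simp)
      have ht : (b :: t').Pairwise (· ≤ ·) := (List.pairwise_cons.1 h).2
      by_cases he : a = b
      · subst he
        simp [List.zip]
      · have hne : (a == b) = false := by simp [he]
        have hrec := ih ht
        have hnota : a ∉ b :: t' := by
          intro hmem
          have hlt : a < b := lt_of_le_of_ne hab he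
          rcases List.mem_cons.1 hmem with h1 | h2
          · exact he h1
          · have : b ≤ a := List.rel_of_pairwise_cons ht h2
            exact absurd (lt_of_lt_of_le hlt this) (lt_irrefl a)
        have hnodup : (a :: b :: t').Nodup ↔ (b :: t').Nodup := by
          simp [List.nodup_cons, hnota]
        simp only [List.zip, List.tail] at hrec
        simp only [List.zip, List.tail, List.zipWith_cons_cons, List.any_cons, hne, Bool.false_or]
        rw [hrec]
        by_cases hn : (b :: t').Nodup <;> simp [hn, hnodup]

-- ===== VERDICT (by name: the statement is the Claim_ definition above) =====
theorem checkCircle_spec : Claim_equal_checkCircle := by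
  intro path _
  unfold Spec_checkCircle checkCircle checkCircle_alt
  rw [checkCircleLoop_eq path PySem.Set.empty List.nodup_nil]
  simp only [PySem.List.slice_from_one]
  rw [adjEq_eq_not_nodup _ (PySem.List.sorted_pairwise path (fun x => x))]
  have hperm := PySem.List.sorted_perm path (fun x => x) false
  simp [hperm.nodup_iff, PySem.Set.empty]
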